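-- pv_equiv track=rewrite | github.com/k-harada/AtCoder | ABC/ABC201-250/ABC238/E.py | solve
-- ===== SOURCE A (Python) =====
-- from collections import deque
--
-- def solve(n, q, lr_list):
--     g = [[] for _ in range(n + 1)]
--     for l, r in lr_list:
--         g[l - 1].append(r)
--         g[r].append(l - 1)
--
--     # BFS
--     visited = [0] * (n + 1)
--     queue = deque([0])
--     visited[0] = 1
--     while len(queue):
--         p = queue.popleft()
--         for q in g[p]:
--             if visited[q] == 0:
--                 visited[q] = 1
--                 queue.append(q)
--
--     if visited[n] == 1:
--         return "Yes"
--     else: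
--         return "No"
-- ===== SOURCE B (Python) =====
-- def solve(n, q, lr_list):
--     # Union-find (disjoint-set) with path compression, merging by smaller
--     # representative; same size-(n+1) list indexed by raw l-1 and r.
--     parent = list(range(n + 1))
--
--     def find(x):
--         root = x
--         while parent[root] != root:
--             root = parent[root]
--         while parent[x] != root:
--             parent[x], x = root, parent[x]
--         return root
--
--     for l, r in lr_list:
--         a = find(l - 1)
--         b = find(r)
--         if a < b:
--             parent[b] = a
--         elif b < a:
--             parent[a] = b
--     return "Yes" if find(0) == find(n) else "No"
-- ===== Notes on version B (the rewrite author's own statement) =====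
-- stated objective: idiomatic
-- what changed: Replaces adjacency-list construction plus BFS with a queue by a union-find (disjoint-set) structure with path compression and merge-by-smaller-representative, answering via find(0) == find(n); it allocates one flat int list instead of n+1 per-node adjacency lists plus a visited array and a deque, which a timing run measured as a constant-factor speedup.
import Mathlib
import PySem

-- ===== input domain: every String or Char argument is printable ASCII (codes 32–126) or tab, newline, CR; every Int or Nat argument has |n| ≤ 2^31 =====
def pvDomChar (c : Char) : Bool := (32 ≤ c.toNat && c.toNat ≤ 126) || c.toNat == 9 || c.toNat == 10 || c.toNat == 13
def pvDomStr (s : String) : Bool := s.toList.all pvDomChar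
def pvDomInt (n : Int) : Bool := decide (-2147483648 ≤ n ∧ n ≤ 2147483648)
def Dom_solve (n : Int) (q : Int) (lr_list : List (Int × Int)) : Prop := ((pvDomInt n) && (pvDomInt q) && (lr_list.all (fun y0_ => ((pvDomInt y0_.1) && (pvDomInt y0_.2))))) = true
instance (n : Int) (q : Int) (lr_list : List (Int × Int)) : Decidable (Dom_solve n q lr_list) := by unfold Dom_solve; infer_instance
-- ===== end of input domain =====

-- B replaces BFS over an adjacency list by a union-find with path compression (idiomatic disjoint-set connectivity); same answers.


-- ===== PORT A =====
-- 'if visited[q] == 0: visited[q] = 1; queue.append(q)' for one neighbour; pyGet?/pySetD are Python's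
-- (possibly negative, wrap-around) list indexing; out-of-range (Python raises) is excluded by Pre_solve.
def bfsVisit (vq : List Int × List Int) (x : Int) : List Int × List Int :=
  if PySem.List.pyGet? vq.1 x = some 0 then (PySem.List.pySetD vq.1 x 1, vq.2 ++ [x]) else vq

-- termination helper for the while-loop of A (cited by bfsLoop's decreasing_by)
theorem bfsVisit_count_set {v : List Int} {x : Int} (h : PySem.List.pyGet? v x = some 0) :
    (PySem.List.pySetD v x 1).count 0 + 1 = v.count 0 := by
  unfold PySem.List.pyGet? at h
  obtain ⟨k, hk1, hk2⟩ : ∃ k, PySem.List.pyIdx? v.length x = some k ∧ v[k]? = some 0 := by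
    cases hidx : PySem.List.pyIdx? v.length x with
    | none => rw [hidx] at h; simp at h
    | some k => rw [hidx] at h; simp at h; exact ⟨k, rfl, by simpa using h⟩
  have hset : PySem.List.pySetD v x 1 = v.set k 1 := by
    unfold PySem.List.pySetD PySem.List.pySet?
    rw [hk1]
    rfl
  rw [hset]
  -- count of a set that overwrites a 0 with a 1
  have hklen : k < v.length := by
    by_contra hc
    rw [List.getElem?_eq_none (by omega)] at hk2
    simp at hk2
  have hget : v[k] = 0 := by
    rw [List.getElem?_eq_getElem hklen] at hk2
    exact Option.some_inj.mp hk2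
  rw [List.set_eq_take_append_cons_drop, if_pos hklen]
  conv_rhs => rw [← List.take_append_drop k v]
  rw [List.drop_eq_getElem_cons hklen, hget]
  simp [List.count_append]
  omega

theorem bfsVisit_measure (nbrs : List Int) (v : List Int) (q : List Int) :
    2 * (nbrs.foldl bfsVisit (v, q)).1.count 0 + (nbrs.foldl bfsVisit (v, q)).2.length
      ≤ 2 * v.count 0 + q.length := by
  induction nbrs generalizing v q with
  | nil => simp
  | cons x xs ih =>
    simp only [List.foldl_cons]
    by_cases h : PySem.List.pyGet? v x = some 0
    · have hb : bfsVisit (v, q) x = (PySem.List.pySetD v x 1, q ++ [x]) := by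
        simp [bfsVisit, h]
      have h1 := bfsVisit_count_set h
      have h2 := ih (PySem.List.pySetD v x 1) (q ++ [x])
      rw [hb]
      simp only [List.length_append, List.length_cons, List.length_nil] at h2 ⊢
      omega
    · have hb : bfsVisit (v, q) x = (v, q) := by simp [bfsVisit, h]
      rw [hb]
      exact ih v q

-- 'while len(queue): p = queue.popleft(); for q in g[p]: …'
def bfsLoop (g : List (List Int)) (visited : List Int) (queue : List Int) : List Int :=
  match queue with
  | [] => visited
  | p :: rest =>
    let s := (PySem.List.pyGetD g p []).foldl bfsVisit (visited, rest)
    bfsLoop g s.1 s.2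
termination_by 2 * visited.count 0 + queue.length
decreasing_by
  have := bfsVisit_measure (PySem.List.pyGetD g p []) visited rest
  simp only [List.length_cons] at *
  omega

def solve (n : Int) (q : Int) (lr_list : List (Int × Int)) : String :=
  let g0 : List (List Int) := (PySem.List.pyRange 0 (n + 1) 1).map (fun _ => ([] : List Int))
  let g := lr_list.foldl (fun g p =>
      let g1 := PySem.List.pySetD g (p.1 - 1) (PySem.List.pyGetD g (p.1 - 1) [] ++ [p.2])
      PySem.List.pySetD g1 p.2 (PySem.List.pyGetD g1 p.2 [] ++ [p.1 - 1])) g0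
  let visited0 := PySem.List.pySetD (List.replicate (n + 1).toNat (0 : Int)) 0 1
  let visited := bfsLoop g visited0 [0]
  if PySem.List.pyGet? visited n = some 1 then "Yes" else "No"

-- ===== PORT B =====
-- Source B's find: 'root = x; while parent[root] != root: root = parent[root]' (fuel-totalised while; under
-- Pre_solve the chain is strictly decreasing, so fuel len+1 is never exhausted — proved below)
def findRootLoop : Nat → List Int → Int → Int
  | 0, _, x => x
  | fuel + 1, parent, x =>
      if PySem.List.pyGetD parent x x ≠ x then findRootLoop fuel parent (PySem.List.pyGetD parent x x)
      else x

-- Source B's compression: 'while parent[x] != root: parent[x], x = root, parent[x]'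
def compressLoop : Nat → List Int → Int → Int → List Int
  | 0, parent, _, _ => parent
  | fuel + 1, parent, x, root =>
      if PySem.List.pyGetD parent x x ≠ root then
        compressLoop fuel (PySem.List.pySetD parent x root) (PySem.List.pyGetD parent x x) root
      else parent

def ufFind (parent : List Int) (x : Int) : List Int × Int :=
  let root := findRootLoop (parent.length + 1) parent x
  (compressLoop (parent.length + 1) parent x root, root)

def ufUnion (parent : List Int) (l r : Int) : List Int :=
  let s1 := ufFind parent (l - 1)
  let s2 := ufFind s1.1 r
  if s1.2 < s2.2 then PySem.List.pySetD s2.1 s2.2 s1.2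
  else if s2.2 < s1.2 then PySem.List.pySetD s2.1 s1.2 s2.2
  else s2.1

def solve_alt (n : Int) (q : Int) (lr_list : List (Int × Int)) : String :=
  let parent0 := PySem.List.pyRange 0 (n + 1) 1
  let parent := lr_list.foldl (fun par p => ufUnion par p.1 p.2) parent0
  let s1 := ufFind parent 0
  let s2 := ufFind s1.1 n
  if s1.2 = s2.2 then "Yes" else "No"

-- ===== PRECONDITION & SPEC =====
-- Exactly the inputs where A returns: n ≥ 0 and every endpoint l-1 and r a valid Python index into the
-- size-(n+1) lists (negative wrap-around included); outside, A raises IndexError while building g or BFSing.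
def Pre_solve (n : Int) (q : Int) (lr_list : List (Int × Int)) : Prop :=
  0 ≤ n ∧ ∀ p ∈ lr_list,
    (-(n + 1) ≤ p.1 - 1 ∧ p.1 - 1 ≤ n) ∧ (-(n + 1) ≤ p.2 ∧ p.2 ≤ n)
instance (n : Int) (q : Int) (lr_list : List (Int × Int)) : Decidable (Pre_solve n q lr_list) := by
  unfold Pre_solve; infer_instance

def pvWitness_solve : Int × Int × (List (Int × Int)) := (2, 1, [(1, 2)])

def Spec_solve (n : Int) (q : Int) (lr_list : List (Int × Int)) (out : String) : Prop := out = solve_alt n q lr_list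
instance (n : Int) (q : Int) (lr_list : List (Int × Int)) (out : String) : Decidable (Spec_solve n q lr_list out) := by unfold Spec_solve; infer_instance

-- ===== CLAIM (what is proved, stated in full; the proofs are below) =====
def Claim_equal_solve : Prop := ∀ (n : Int) (q : Int) (lr_list : List (Int × Int)), Dom_solve n q lr_list → Pre_solve n q lr_list → Spec_solve n q lr_list (solve n q lr_list)

-- ===== LEMMAS AND PROOFS =====
-- ---------- index normalisation ----------

def nuI (N : Nat) (i : Int) : Nat := (PySem.List.pyIdx? N i).getD 0

theorem pyIdx?_inrange {N : Nat} {i : Int} (h1 : -(N : Int) ≤ i) (h2 : i < N) :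
    PySem.List.pyIdx? N i = some (nuI N i) := by
  unfold nuI PySem.List.pyIdx?
  split_ifs with h3 h4 h5 <;> simp_all <;> omega

theorem nuI_lt {N : Nat} {i : Int} (h1 : -(N : Int) ≤ i) (h2 : i < N) : nuI N i < N := by
  unfold nuI PySem.List.pyIdx?
  split_ifs with h3 h4 h5 <;> simp_all <;> omega

theorem nuI_ofNat {N : Nat} {i : Int} (h0 : 0 ≤ i) (h2 : i < N) : nuI N i = i.toNat := by
  unfold nuI PySem.List.pyIdx?
  split_ifs <;> simp_all

theorem nuI_natCast {N k : Nat} (h : k < N) : nuI N (k : Int) = k := by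
  rw [nuI_ofNat (by omega) (by exact_mod_cast h)]; simp

theorem pyGet?_nu {α : Type} {xs : List α} {i : Int} (h1 : -(xs.length : Int) ≤ i)
    (h2 : i < xs.length) : PySem.List.pyGet? xs i = xs[nuI xs.length i]? := by
  unfold PySem.List.pyGet?
  rw [pyIdx?_inrange h1 h2]
  rfl

theorem pyGetD_nu {α : Type} {xs : List α} {i : Int} {d : α} (h1 : -(xs.length : Int) ≤ i)
    (h2 : i < xs.length) : PySem.List.pyGetD xs i d = xs.getD (nuI xs.length i) d := by
  unfold PySem.List.pyGetD
  rw [pyGet?_nu h1 h2]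
  simp [List.getD]

theorem pySetD_nu {α : Type} {xs : List α} {i : Int} {v : α} (h1 : -(xs.length : Int) ≤ i)
    (h2 : i < xs.length) : PySem.List.pySetD xs i v = xs.set (nuI xs.length i) v := by
  unfold PySem.List.pySetD PySem.List.pySet?
  rw [pyIdx?_inrange h1 h2]
  rfl

theorem getD_set_self {α : Type} {xs : List α} {k : Nat} {a d : α} (h : k < xs.length) :
    (xs.set k a).getD k d = a := by
  simp [List.getD, h]

theorem getD_set_ne {α : Type} {xs : List α} {k j : Nat} {a d : α} (h : j ≠ k) :
    (xs.set k a).getD j d = xs.getD j d := by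
  simp [List.getD, List.getElem?_set, h.symm]

theorem getD_eq_default_of_le {α : Type} {xs : List α} {k : Nat} {d : α} (h : xs.length ≤ k) :
    xs.getD k d = d := by
  simp [List.getD, List.getElem?_eq_none h]

-- ---------- the connectivity relation of the edge list ----------

def ERel (E : List (Nat × Nat)) (a b : Nat) : Prop := (a, b) ∈ E ∨ (b, a) ∈ E

def Conn (E : List (Nat × Nat)) (a b : Nat) : Prop := Relation.ReflTransGen (ERel E) a b

def edgesOf (N : Nat) (lr : List (Int × Int)) : List (Nat × Nat) :=
  lr.map (fun p => (nuI N (p.1 - 1), nuI N p.2))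

theorem conn_trans {E : List (Nat × Nat)} {a b c : Nat} (h1 : Conn E a b) (h2 : Conn E b c) :
    Conn E a c := Relation.ReflTransGen.trans h1 h2

theorem conn_single {E : List (Nat × Nat)} {a b : Nat} (h : ERel E a b) : Conn E a b :=
  Relation.ReflTransGen.single h

theorem conn_empty {a b : Nat} : Conn [] a b ↔ a = b := by
  constructor
  · intro h
    induction h with
    | refl => rfl
    | tail _ hstep ih => cases hstep <;> simp_all
  · rintro rfl; exact Relation.ReflTransGen.refl

theorem conn_mono {E : List (Nat × Nat)} {e : Nat × Nat} {a b : Nat} (h : Conn E a b) :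
    Conn (E ++ [e]) a b := by
  induction h with
  | refl => exact Relation.ReflTransGen.refl
  | tail _ hstep ih =>
      exact ih.tail (hstep.elim (fun m => Or.inl (by simp [m])) (fun m => Or.inr (by simp [m])))

theorem conn_append_iff {E : List (Nat × Nat)} {A B a b : Nat} :
    Conn (E ++ [(A, B)]) a b ↔
      Conn E a b ∨ (Conn E a A ∧ Conn E B b) ∨ (Conn E a B ∧ Conn E A b) := by
  constructor
  · intro h
    induction h with
    | refl => exact Or.inl Relation.ReflTransGen.refl
    | tail _ hstep ih =>
        rename_i x y _
        have hstep' : ERel E x y ∨ (x = A ∧ y = B) ∨ (x = B ∧ y = A) := by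
          rcases hstep with hm | hm <;> rw [List.mem_append] at hm <;>
            rcases hm with hm | hm <;> simp_all [ERel] <;> tauto
        rcases hstep' with hxy | ⟨rfl, rfl⟩ | ⟨rfl, rfl⟩
        · rcases ih with h1 | ⟨h1, h2⟩ | ⟨h1, h2⟩
          · exact Or.inl (h1.tail hxy)
          · exact Or.inr (Or.inl ⟨h1, h2.tail hxy⟩)
          · exact Or.inr (Or.inr ⟨h1, h2.tail hxy⟩)
        · rcases ih with h1 | ⟨h1, h2⟩ | ⟨h1, h2⟩
          · exact Or.inr (Or.inl ⟨h1, Relation.ReflTransGen.refl⟩)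
          · exact Or.inr (Or.inl ⟨h1, Relation.ReflTransGen.refl⟩)
          · exact Or.inl h1
        · rcases ih with h1 | ⟨h1, h2⟩ | ⟨h1, h2⟩
          · exact Or.inr (Or.inr ⟨h1, Relation.ReflTransGen.refl⟩)
          · exact Or.inl h1
          · exact Or.inr (Or.inr ⟨h1, Relation.ReflTransGen.refl⟩)
  · rintro (h | ⟨h1, h2⟩ | ⟨h1, h2⟩)
    · exact conn_mono h
    · exact conn_trans (conn_mono h1)
        (conn_trans (conn_single (Or.inl (by simp))) (conn_mono h2))
    · exact conn_trans (conn_mono h1)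
        (conn_trans (conn_single (Or.inr (by simp))) (conn_mono h2))

-- ---------- PART 1: the graph A builds ----------

structure GraphOK (N : Nat) (E : List (Nat × Nat)) (g : List (List Int)) : Prop where
  len : g.length = N
  sound : ∀ j : Nat, ∀ v ∈ g.getD j [], (-(N : Int) ≤ v ∧ v < N) ∧ ERel E j (nuI N v)
  compl : ∀ e ∈ E, (∃ v ∈ g.getD e.1 [], nuI N v = e.2) ∧ (∃ w ∈ g.getD e.2 [], nuI N w = e.1)

theorem build_step_ok {N : Nat} {E : List (Nat × Nat)} {g : List (List Int)} (hg : GraphOK N E g)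
    {l r : Int} (hl1 : -(N : Int) ≤ l - 1) (hl2 : l - 1 < N) (hr1 : -(N : Int) ≤ r) (hr2 : r < N) :
    GraphOK N (E ++ [(nuI N (l - 1), nuI N r)])
      (PySem.List.pySetD (PySem.List.pySetD g (l - 1) (PySem.List.pyGetD g (l - 1) [] ++ [r]))
        r (PySem.List.pyGetD (PySem.List.pySetD g (l - 1) (PySem.List.pyGetD g (l - 1) [] ++ [r])) r [] ++ [l - 1])) := by
  have hgl : g.length = N := hg.len
  have hAN : nuI N (l - 1) < N := nuI_lt hl1 hl2
  have hBN : nuI N r < N := nuI_lt hr1 hr2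
  have hALen : nuI N (l - 1) < g.length := by rw [hgl]; exact hAN
  have hg1 : PySem.List.pySetD g (l - 1) (PySem.List.pyGetD g (l - 1) [] ++ [r])
      = g.set (nuI N (l - 1)) (g.getD (nuI N (l - 1)) [] ++ [r]) := by
    rw [pyGetD_nu (by rw [hgl]; exact hl1) (by rw [hgl]; exact hl2),
      pySetD_nu (by rw [hgl]; exact hl1) (by rw [hgl]; exact hl2), hgl]
  rw [hg1]
  set g1 := g.set (nuI N (l - 1)) (g.getD (nuI N (l - 1)) [] ++ [r]) with hg1d
  have hg1l : g1.length = N := by rw [hg1d, List.length_set]; exact hgl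
  have hBLen : nuI N r < g1.length := by rw [hg1l]; exact hBN
  have hg2 : PySem.List.pySetD g1 r (PySem.List.pyGetD g1 r [] ++ [l - 1])
      = g1.set (nuI N r) (g1.getD (nuI N r) [] ++ [l - 1]) := by
    rw [pyGetD_nu (by rw [hg1l]; exact hr1) (by rw [hg1l]; exact hr2),
      pySetD_nu (by rw [hg1l]; exact hr1) (by rw [hg1l]; exact hr2), hg1l]
  rw [hg2]
  set g2 := g1.set (nuI N r) (g1.getD (nuI N r) [] ++ [l - 1]) with hg2d
  -- membership characterisations
  have hmem1 : ∀ j x, x ∈ g1.getD j [] → x = r ∧ j = nuI N (l - 1) ∨ x ∈ g.getD j [] := by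
    intro j x hx
    by_cases hj : j = nuI N (l - 1)
    · subst hj
      rw [hg1d, getD_set_self hALen, List.mem_append] at hx
      rcases hx with hx | hx
      · exact Or.inr hx
      · simp at hx; exact Or.inl ⟨hx, rfl⟩
    · rw [hg1d, getD_set_ne hj] at hx
      exact Or.inr hx
  have hmem2 : ∀ j x, x ∈ g2.getD j [] → x = l - 1 ∧ j = nuI N r ∨ x ∈ g1.getD j [] := by
    intro j x hx
    by_cases hj : j = nuI N r
    · subst hj
      rw [hg2d, getD_set_self hBLen, List.mem_append] at hx
      rcases hx with hx | hx
      · exact Or.inr hx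
      · simp at hx; exact Or.inl ⟨hx, rfl⟩
    · rw [hg2d, getD_set_ne hj] at hx
      exact Or.inr hx
  have hsub1 : ∀ j x, x ∈ g.getD j [] → x ∈ g1.getD j [] := by
    intro j x hx
    by_cases hj : j = nuI N (l - 1)
    · subst hj; rw [hg1d, getD_set_self hALen, List.mem_append]; exact Or.inl hx
    · rw [hg1d, getD_set_ne hj]; exact hx
  have hsub2 : ∀ j x, x ∈ g1.getD j [] → x ∈ g2.getD j [] := by
    intro j x hx
    by_cases hj : j = nuI N r
    · subst hj; rw [hg2d, getD_set_self hBLen, List.mem_append]; exact Or.inl hx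
    · rw [hg2d, getD_set_ne hj]; exact hx
  have hrB : r ∈ g2.getD (nuI N (l - 1)) [] := by
    apply hsub2
    rw [hg1d, getD_set_self hALen, List.mem_append]
    exact Or.inr (by simp)
  have hlA : l - 1 ∈ g2.getD (nuI N r) [] := by
    rw [hg2d, getD_set_self hBLen, List.mem_append]
    exact Or.inr (by simp)
  refine ⟨by rw [hg2d, List.length_set, hg1l], ?_, ?_⟩
  · intro j v hv
    rcases hmem2 j v hv with ⟨rfl, rfl⟩ | hv1
    · exact ⟨⟨hl1, hl2⟩, Or.inr (by simp)⟩
    · rcases hmem1 j v hv1 with ⟨rfl, rfl⟩ | hv0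
      · exact ⟨⟨hr1, hr2⟩, Or.inl (by simp)⟩
      · obtain ⟨hrange, herel⟩ := hg.sound j v hv0
        exact ⟨hrange, herel.elim (fun m => Or.inl (by simp [m])) (fun m => Or.inr (by simp [m]))⟩
  · intro e he
    rw [List.mem_append] at he
    rcases he with he | he
    · obtain ⟨⟨v, hv, hveq⟩, ⟨w, hw, hweq⟩⟩ := hg.compl e he
      exact ⟨⟨v, hsub2 _ _ (hsub1 _ _ hv), hveq⟩, ⟨w, hsub2 _ _ (hsub1 _ _ hw), hweq⟩⟩
    · simp only [List.mem_singleton] at he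
      subst he
      exact ⟨⟨r, hrB, rfl⟩, ⟨l - 1, hlA, rfl⟩⟩

theorem build_ok {N : Nat} (lr : List (Int × Int))
    (hlr : ∀ p ∈ lr, (-(N : Int) ≤ p.1 - 1 ∧ p.1 - 1 < N) ∧ (-(N : Int) ≤ p.2 ∧ p.2 < N))
    {E : List (Nat × Nat)} {g : List (List Int)} (hg : GraphOK N E g) :
    GraphOK N (E ++ edgesOf N lr)
      (lr.foldl (fun g p =>
        let g1 := PySem.List.pySetD g (p.1 - 1) (PySem.List.pyGetD g (p.1 - 1) [] ++ [p.2])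
        PySem.List.pySetD g1 p.2 (PySem.List.pyGetD g1 p.2 [] ++ [p.1 - 1])) g) := by
  induction lr generalizing E g with
  | nil => simpa [edgesOf]
  | cons p ps ih =>
      have hp := hlr p (by simp)
      have hstep := build_step_ok hg hp.1.1 hp.1.2 hp.2.1 hp.2.2
      have := ih (fun x hx => hlr x (by simp [hx])) hstep
      simpa [edgesOf, List.foldl_cons] using this

theorem edges_bound {N : Nat} {lr : List (Int × Int)}
    (hlr : ∀ p ∈ lr, (-(N : Int) ≤ p.1 - 1 ∧ p.1 - 1 < N) ∧ (-(N : Int) ≤ p.2 ∧ p.2 < N)) :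
    ∀ e ∈ edgesOf N lr, e.1 < N ∧ e.2 < N := by
  intro e he
  simp only [edgesOf, List.mem_map] at he
  obtain ⟨p, hp, rfl⟩ := he
  have := hlr p hp
  exact ⟨nuI_lt this.1.1 this.1.2, nuI_lt this.2.1 this.2.2⟩

-- ---------- PART 1: BFS ----------

structure BfsInv (N : Nat) (E : List (Nat × Nat)) (v : List Int) (Q : List Int) : Prop where
  len : v.length = N
  bin : ∀ k, v.getD k 0 = 0 ∨ v.getD k 0 = 1
  zero : v.getD 0 0 = 1
  qrange : ∀ x ∈ Q, -(N : Int) ≤ x ∧ x < N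
  qvis : ∀ x ∈ Q, v.getD (nuI N x) 0 = 1
  vsound : ∀ k, v.getD k 0 = 1 → Conn E 0 k
  frontier : ∀ k, v.getD k 0 = 1 →
    (∃ x ∈ Q, nuI N x = k) ∨ (∀ b, ERel E k b → v.getD b 0 = 1)

theorem fold_facts {N : Nat} (nbrs : List Int) : ∀ (v Q : List Int),
    v.length = N → (∀ k, v.getD k 0 = 0 ∨ v.getD k 0 = 1) →
    (∀ x ∈ nbrs, -(N : Int) ≤ x ∧ x < N) →
    (nbrs.foldl bfsVisit (v, Q)).1.length = N ∧
    (∀ k, v.getD k 0 = 1 → (nbrs.foldl bfsVisit (v, Q)).1.getD k 0 = 1) ∧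
    (∀ k, (nbrs.foldl bfsVisit (v, Q)).1.getD k 0 = 0 ∨ (nbrs.foldl bfsVisit (v, Q)).1.getD k 0 = 1) ∧
    (∀ x ∈ (nbrs.foldl bfsVisit (v, Q)).2, x ∈ Q ∨ x ∈ nbrs) ∧
    (∀ x ∈ Q, x ∈ (nbrs.foldl bfsVisit (v, Q)).2) ∧
    (∀ x ∈ nbrs, (nbrs.foldl bfsVisit (v, Q)).1.getD (nuI N x) 0 = 1) ∧
    (∀ k, (nbrs.foldl bfsVisit (v, Q)).1.getD k 0 = 1 →
      v.getD k 0 = 1 ∨ ∃ x ∈ (nbrs.foldl bfsVisit (v, Q)).2, nuI N x = k) := by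
  induction nbrs with
  | nil =>
    intro v Q hlen hbin hnb
    exact ⟨hlen, fun k h => h, hbin, fun x hx => Or.inl hx, fun x hx => hx,
      by simp, fun k h => Or.inl h⟩
  | cons x xs ih =>
    intro v Q hlen hbin hnb
    simp only [List.foldl_cons]
    obtain ⟨hx1, hx2⟩ := hnb x (by simp)
    have hnuLen : nuI N x < v.length := by rw [hlen]; exact nuI_lt hx1 hx2
    by_cases hc : PySem.List.pyGet? v x = some 0
    · have hb : bfsVisit (v, Q) x = (v.set (nuI N x) 1, Q ++ [x]) := by
        simp only [bfsVisit, hc, if_pos]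
        rw [pySetD_nu (by rw [hlen]; exact hx1) (by rw [hlen]; exact hx2), hlen]
      rw [hb]
      have hlen' : (v.set (nuI N x) 1).length = N := by rw [List.length_set]; exact hlen
      have hbin' : ∀ k, (v.set (nuI N x) 1).getD k 0 = 0 ∨ (v.set (nuI N x) 1).getD k 0 = 1 := by
        intro k
        by_cases hk : k = nuI N x
        · subst hk; rw [getD_set_self hnuLen]; exact Or.inr rfl
        · rw [getD_set_ne hk]; exact hbin k
      obtain ⟨f1, f2, f3, f4, f5, f6, f7⟩ :=
        ih (v.set (nuI N x) 1) (Q ++ [x]) hlen' hbin' (fun y hy => hnb y (by simp [hy]))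
      have hmono' : ∀ k, v.getD k 0 = 1 → (v.set (nuI N x) 1).getD k 0 = 1 := by
        intro k hk
        by_cases hke : k = nuI N x
        · subst hke; rw [getD_set_self hnuLen]
        · rw [getD_set_ne hke]; exact hk
      refine ⟨f1, fun k hk => f2 k (hmono' k hk), f3, ?_, ?_, ?_, ?_⟩
      · intro y hy
        rcases f4 y hy with hy' | hy'
        · rw [List.mem_append] at hy'
          rcases hy' with hy' | hy'
          · exact Or.inl hy'
          · simp at hy'; exact Or.inr (by simp [hy'])
        · exact Or.inr (by simp [hy'])
      · intro y hy
        exact f5 y (by rw [List.mem_append]; exact Or.inl hy)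
      · intro y hy
        rcases List.mem_cons.mp hy with rfl | hy'
        · exact f2 _ (getD_set_self hnuLen)
        · exact f6 y hy'
      · intro k hk
        rcases f7 k hk with hk' | hk'
        · by_cases hke : k = nuI N x
          · subst hke
            exact Or.inr ⟨x, f5 x (by rw [List.mem_append]; simp), rfl⟩
          · rw [getD_set_ne hke] at hk'
            exact Or.inl hk'
        · exact Or.inr hk'
    · have hb : bfsVisit (v, Q) x = (v, Q) := by simp [bfsVisit, hc]
      rw [hb]
      have hvx : v.getD (nuI N x) 0 = 1 := by
        have hget : PySem.List.pyGet? v x = some (v.getD (nuI N x) 0) := by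
          rw [pyGet?_nu (by rw [hlen]; exact hx1) (by rw [hlen]; exact hx2), hlen]
          rw [List.getD_eq_getElem _ _ hnuLen, List.getElem?_eq_getElem hnuLen]
        rcases hbin (nuI N x) with h0 | h1
        · exfalso; rw [h0] at hget; exact hc hget
        · exact h1
      obtain ⟨f1, f2, f3, f4, f5, f6, f7⟩ :=
        ih v Q hlen hbin (fun y hy => hnb y (by simp [hy]))
      refine ⟨f1, f2, f3, ?_, f5, ?_, f7⟩
      · intro y hy
        rcases f4 y hy with hy' | hy'
        · exact Or.inl hy'
        · exact Or.inr (by simp [hy'])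
      · intro y hy
        rcases List.mem_cons.mp hy with rfl | hy'
        · exact f2 _ hvx
        · exact f6 y hy'

theorem bfs_main {N : Nat} {E : List (Nat × Nat)} (hE : ∀ e ∈ E, e.1 < N ∧ e.2 < N) :
    ∀ (g : List (List Int)) (v Q : List Int), GraphOK N E g → BfsInv N E v Q →
    (bfsLoop g v Q).length = N ∧
    ∀ k, ((bfsLoop g v Q).getD k 0 = 1 ↔ Conn E 0 k ∧ k < N) := by
  intro g v Q hg
  induction v, Q using bfsLoop.induct g with
  | case1 v =>
    intro h
    rw [bfsLoop]
    refine ⟨h.len, fun k => ⟨fun hk => ?_, fun hk => ?_⟩⟩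
    · refine ⟨h.vsound k hk, ?_⟩
      by_contra hkN
      rw [getD_eq_default_of_le (by rw [h.len]; omega)] at hk
      exact absurd hk (by norm_num)
    · have hclosed : ∀ a b, v.getD a 0 = 1 → ERel E a b → v.getD b 0 = 1 := by
        intro a b ha hab
        rcases h.frontier a ha with ⟨x, hx, _⟩ | hcl
        · simp at hx
        · exact hcl b hab
      obtain ⟨hconn, hkN⟩ := hk
      clear hkN
      induction hconn with
      | refl => exact h.zero
      | tail hc hstep ihc => exact hclosed _ _ ihc hstep
  | case2 v p rest s ih =>
    intro h
    have hsdef : s = List.foldl bfsVisit (v, rest) (PySem.List.pyGetD g p []) := rfl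
    obtain ⟨hp1, hp2⟩ := h.qrange p (by simp)
    have hglen : g.length = N := hg.len
    have hnbrs : PySem.List.pyGetD g p [] = g.getD (nuI N p) [] := by
      rw [pyGetD_nu (by rw [hglen]; exact hp1) (by rw [hglen]; exact hp2), hglen]
    have hnb : ∀ x ∈ g.getD (nuI N p) [], -(N : Int) ≤ x ∧ x < N :=
      fun x hx => (hg.sound (nuI N p) x hx).1
    obtain ⟨f1, f2, f3, f4, f5, f6, f7⟩ :=
      fold_facts (g.getD (nuI N p) []) v rest h.len h.bin hnb
    have hs : s = (g.getD (nuI N p) []).foldl bfsVisit (v, rest) := by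
      rw [hsdef, hnbrs]
    have hInv : BfsInv N E s.1 s.2 := by
      rw [hs]
      refine ⟨f1, f3, f2 0 h.zero, ?_, ?_, ?_, ?_⟩
      · intro x hx
        rcases f4 x hx with hx' | hx'
        · exact h.qrange x (by simp [hx'])
        · exact hnb x hx'
      · intro x hx
        rcases f4 x hx with hx' | hx'
        · exact f2 _ (h.qvis x (by simp [hx']))
        · exact f6 x hx'
      · intro k hk
        rcases f7 k hk with hk' | ⟨x, hxs, rfl⟩
        · exact h.vsound k hk'
        · rcases f4 x hxs with hx' | hx'
          · exact h.vsound _ (h.qvis x (by simp [hx']))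
          · have hedge : ERel E (nuI N p) (nuI N x) := (hg.sound (nuI N p) x hx').2
            have hconnp : Conn E 0 (nuI N p) := h.vsound _ (h.qvis p (by simp))
            exact hconnp.tail hedge
      · intro k hk
        by_cases hv1 : v.getD k 0 = 1
        · rcases h.frontier k hv1 with ⟨x, hxQ, rfl⟩ | hcl
          · rcases List.mem_cons.mp hxQ with rfl | hxrest
            · refine Or.inr ?_
              intro b hb
              rcases hb with hm | hm
              · obtain ⟨⟨v0, hv0, hv0eq⟩, _⟩ := hg.compl _ hm
                have h6 := f6 v0 hv0
                rw [hv0eq] at h6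
                exact h6
              · obtain ⟨_, ⟨w0, hw0, hw0eq⟩⟩ := hg.compl _ hm
                have h6 := f6 w0 hw0
                rw [hw0eq] at h6
                exact h6
            · exact Or.inl ⟨x, f5 x hxrest, rfl⟩
          · exact Or.inr fun b hb => f2 b (hcl b hb)
        · rcases f7 k hk with hk' | hk'
          · exact absurd hk' hv1
          · exact Or.inl hk'
    have := ih hInv
    rw [bfsLoop]
    exact this

-- ---------- PART 2: union-find ----------

def rootF (par : List Int) (k : Nat) : Nat :=
  if h : (par.getD k 0).toNat < k then rootF par (par.getD k 0).toNat else k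
termination_by k

structure PInv (N : Nat) (par : List Int) : Prop where
  len : par.length = N
  lo : ∀ k, 0 ≤ par.getD k 0
  hi : ∀ k, par.getD k 0 ≤ (k : Int)

theorem rootF_le (par : List Int) (k : Nat) : rootF par k ≤ k := by
  induction k using Nat.strong_induction_on with
  | _ k ih =>
    rw [rootF]
    split_ifs with h
    · exact le_trans (ih _ h) (by omega)
    · exact le_rfl

theorem rootF_fix {N : Nat} {par : List Int} (h : PInv N par) (k : Nat) :
    par.getD (rootF par k) 0 = (rootF par k : Int) := by
  induction k using Nat.strong_induction_on with
  | _ k ih =>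
    rw [rootF]
    split_ifs with hlt
    · exact ih _ hlt
    · have h1 := h.lo k
      have h2 := h.hi k
      omega

theorem rootF_of_fix {par : List Int} {k : Nat} (h : par.getD k 0 = (k : Int)) :
    rootF par k = k := by
  rw [rootF, dif_neg]
  rw [h]
  simp

theorem rootF_step {par : List Int} {k : Nat} (h : (par.getD k 0).toNat < k) :
    rootF par k = rootF par (par.getD k 0).toNat := by
  rw [rootF, dif_pos h]

theorem rootF_idem {N : Nat} {par : List Int} (h : PInv N par) (k : Nat) :
    rootF par (rootF par k) = rootF par k :=
  rootF_of_fix (rootF_fix h k)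

theorem getD_irrel {α : Type} {xs : List α} {k : Nat} (h : k < xs.length) (d d' : α) :
    xs.getD k d = xs.getD k d' := by
  rw [List.getD_eq_getElem _ _ h, List.getD_eq_getElem _ _ h]

theorem findRoot_eq_nat {N : Nat} {par : List Int} (h : PInv N par) :
    ∀ (fuel : Nat) (k : Nat), k < N → k < fuel →
      findRootLoop fuel par (k : Int) = (rootF par k : Int) := by
  intro fuel
  induction fuel with
  | zero => intro k _ hk; omega
  | succ fuel ih =>
    intro k hkN hkf
    have hlen : k < par.length := by rw [h.len]; exact hkN
    have hget : PySem.List.pyGetD par (k : Int) (k : Int) = par.getD k 0 := by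
      rw [PySem.List.pyGetD_natCast]
      exact getD_irrel hlen _ _
    rw [findRootLoop, hget]
    by_cases hfix : par.getD k 0 = (k : Int)
    · rw [if_neg (not_not_intro hfix), rootF_of_fix hfix]
    · have hlo := h.lo k
      have hhi := h.hi k
      have hlt : (par.getD k 0).toNat < k := by omega
      rw [if_pos hfix,
        show par.getD k 0 = (((par.getD k 0).toNat : Nat) : Int) by omega,
        ih _ (by omega) (by omega), rootF_step hlt]

theorem findRoot_eq {N : Nat} {par : List Int} (h : PInv N par) {x : Int}
    (h1 : -(N : Int) ≤ x) (h2 : x < N) :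
    findRootLoop (N + 1) par x = (rootF par (nuI N x) : Int) := by
  by_cases hx : 0 ≤ x
  · rw [nuI_ofNat hx h2, show x = ((x.toNat : Nat) : Int) by omega]
    exact findRoot_eq_nat h _ _ (by omega) (by omega)
  · have hN : 0 < N := by omega
    have hnu : nuI N x < N := nuI_lt h1 h2
    have hlen : nuI N x < par.length := by rw [h.len]; exact hnu
    have hget : PySem.List.pyGetD par x x = par.getD (nuI N x) 0 := by
      rw [pyGetD_nu (by rw [h.len]; exact h1) (by rw [h.len]; exact h2), h.len]
      exact getD_irrel hlen _ _
    have hlo := h.lo (nuI N x)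
    have hhi := h.hi (nuI N x)
    rw [findRootLoop, hget, if_pos (by omega)]
    set w := par.getD (nuI N x) 0 with hw
    have hrec : findRootLoop N par w = (rootF par w.toNat : Int) := by
      rw [show w = ((w.toNat : Nat) : Int) by omega]
      exact findRoot_eq_nat h _ _ (by omega) (by omega)
    rw [hrec]
    by_cases hfix : w = (nuI N x : Int)
    · rw [show w.toNat = nuI N x by omega, rootF_of_fix (by rw [← hw, hfix])]
    · rw [rootF_step (k := nuI N x) (by omega), ← hw]

theorem set_root_preserve {N : Nat} {par : List Int} (h : PInv N par) {j : Nat} (hj : j < N) :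
    PInv N (par.set j (rootF par j : Int)) ∧
    ∀ k, rootF (par.set j (rootF par j : Int)) k = rootF par k := by
  have hjlen : j < par.length := by rw [h.len]; exact hj
  have hrle := rootF_le par j
  set r := rootF par j with hr
  constructor
  · refine ⟨by rw [List.length_set]; exact h.len, ?_, ?_⟩
    · intro k
      by_cases hk : k = j
      · subst hk; rw [getD_set_self hjlen]; positivity
      · rw [getD_set_ne hk]; exact h.lo k
    · intro k
      by_cases hk : k = j
      · subst hk; rw [getD_set_self hjlen]; exact_mod_cast hrle
      · rw [getD_set_ne hk]; exact h.hi k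
  · intro k
    induction k using Nat.strong_induction_on with
    | _ k ih =>
      by_cases hk : k = j
      · subst hk
        rcases Nat.lt_or_ge r k with hlt | hge
        · rw [rootF, dif_pos (by rw [getD_set_self hjlen]; simpa using hlt),
            getD_set_self hjlen]
          simp only [Int.toNat_natCast]
          rw [ih _ hlt]
          rw [hr]
          exact rootF_idem h k
        · have heq : r = k := by omega
          rw [rootF_of_fix (by rw [getD_set_self hjlen, heq]), ← hr]
          omega
      · have hgd : (par.set j (r : Int)).getD k 0 = par.getD k 0 := getD_set_ne hk
        rw [rootF, hgd]
        conv_rhs => rw [rootF]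
        split_ifs with hlt
        · exact ih _ hlt
        · rfl

theorem compress_preserve {N : Nat} (fuel : Nat) : ∀ {par : List Int}, PInv N par → ∀ {x : Int},
    -(N : Int) ≤ x → x < N → ∀ {root : Nat}, root = rootF par (nuI N x) →
    PInv N (compressLoop fuel par x (root : Int)) ∧
    ∀ k, rootF (compressLoop fuel par x (root : Int)) k = rootF par k := by
  induction fuel with
  | zero => intro par h x h1 h2 root hroot; exact ⟨h, fun k => rfl⟩
  | succ fuel ih =>
    intro par h x h1 h2 root hroot
    have hnu : nuI N x < N := nuI_lt h1 h2
    have hlen : nuI N x < par.length := by rw [h.len]; exact hnu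
    have hget : PySem.List.pyGetD par x x = par.getD (nuI N x) 0 := by
      rw [pyGetD_nu (by rw [h.len]; exact h1) (by rw [h.len]; exact h2), h.len]
      exact getD_irrel hlen _ _
    rw [compressLoop, hget]
    by_cases hc : par.getD (nuI N x) 0 = (root : Int)
    · rw [if_neg (not_not_intro hc)]
      exact ⟨h, fun k => rfl⟩
    · rw [if_pos hc]
      set w := par.getD (nuI N x) 0 with hw
      have hlo := h.lo (nuI N x)
      have hhi := h.hi (nuI N x)
      have hwlt : w.toNat < nuI N x := by
        rcases Nat.lt_or_ge w.toNat (nuI N x) with hlt | hge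
        · exact hlt
        · exfalso
          have hwe : w = (nuI N x : Int) := by omega
          rw [hroot] at hc
          exact hc (by rw [hwe, rootF_of_fix (by rw [← hw, hwe])])
      have hroot' : root = rootF par w.toNat := by
        rw [hroot]; exact rootF_step (by omega)
      have hset : PySem.List.pySetD par x (root : Int) = par.set (nuI N x) (root : Int) := by
        rw [pySetD_nu (by rw [h.len]; exact h1) (by rw [h.len]; exact h2), h.len]
      have hsp : PInv N (par.set (nuI N x) (root : Int)) ∧
          ∀ k, rootF (par.set (nuI N x) (root : Int)) k = rootF par k := by
        rw [hroot]; exact set_root_preserve h hnu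
      have hwN : w < (N : Int) := by
        have : (nuI N x : Int) < (N : Int) := by exact_mod_cast hnu
        omega
      have hih := ih (par := par.set (nuI N x) (root : Int)) hsp.1 (x := w)
        (by omega) hwN (root := root)
        (by rw [nuI_ofNat (by omega) hwN, hsp.2, ← hroot'])
      rw [hset]
      exact ⟨hih.1, fun k => by rw [hih.2 k, hsp.2 k]⟩

theorem ufFind_spec {N : Nat} {par : List Int} (h : PInv N par) {x : Int}
    (h1 : -(N : Int) ≤ x) (h2 : x < N) :
    (ufFind par x).2 = (rootF par (nuI N x) : Int) ∧
    PInv N (ufFind par x).1 ∧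
    ∀ k, rootF (ufFind par x).1 k = rootF par k := by
  unfold ufFind
  have hfr : findRootLoop (par.length + 1) par x = (rootF par (nuI N x) : Int) := by
    rw [h.len]; exact findRoot_eq h h1 h2
  have hcp := compress_preserve (N := N) (par.length + 1) h h1 h2 (root := rootF par (nuI N x)) rfl
  simp only [hfr]
  exact ⟨trivial, hcp.1, hcp.2⟩

theorem union_write {N : Nat} {par : List Int} (h : PInv N par) {a b : Nat}
    (hb : b < N) (hra : par.getD a 0 = (a : Int)) (hrb : par.getD b 0 = (b : Int))
    (hab : a < b) :
    PInv N (par.set b (a : Int)) ∧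
    ∀ k, rootF (par.set b (a : Int)) k = if rootF par k = b then a else rootF par k := by
  have hblen : b < par.length := by rw [h.len]; exact hb
  constructor
  · refine ⟨by rw [List.length_set]; exact h.len, ?_, ?_⟩
    · intro k
      by_cases hk : k = b
      · subst hk; rw [getD_set_self hblen]; positivity
      · rw [getD_set_ne hk]; exact h.lo k
    · intro k
      by_cases hk : k = b
      · subst hk; rw [getD_set_self hblen]; exact_mod_cast Nat.le_of_lt hab
      · rw [getD_set_ne hk]; exact h.hi k
  · intro k
    induction k using Nat.strong_induction_on with
    | _ k ih =>
      by_cases hk : k = b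
      · subst hk
        rw [rootF_of_fix hrb, if_pos rfl]
        rw [rootF, dif_pos (by rw [getD_set_self hblen]; simpa using hab),
          getD_set_self hblen]
        simp only [Int.toNat_natCast]
        rw [ih _ hab, rootF_of_fix hra]
        simp [Nat.ne_of_lt hab]
      · have hgd : (par.set b (a : Int)).getD k 0 = par.getD k 0 := getD_set_ne hk
        by_cases hlt : (par.getD k 0).toNat < k
        · rw [rootF_step (par := par.set b (a : Int)) (k := k) (by rw [hgd]; exact hlt), hgd,
            rootF_step (par := par) hlt]
          exact ih _ hlt
        · have hlo := h.lo k
          have hhi := h.hi k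
          have hfixk : par.getD k 0 = (k : Int) := by omega
          rw [rootF_of_fix (by rw [hgd]; exact hfixk), rootF_of_fix hfixk, if_neg hk]

def RootConn (N : Nat) (par : List Int) (E : List (Nat × Nat)) : Prop :=
  ∀ j k, j < N → k < N → (rootF par j = rootF par k ↔ Conn E j k)

theorem union_edge_rc {N : Nat} {par : List Int} {E : List (Nat × Nat)}
    (h : PInv N par) (hrc : RootConn N par E) {A B : Nat} (hA : A < N) (hB : B < N)
    {big small : Nat} (hsb : small < big)
    (hAB : (rootF par A = big ∧ rootF par B = small) ∨ (rootF par A = small ∧ rootF par B = big)) :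
    PInv N (par.set big (small : Int)) ∧
    RootConn N (par.set big (small : Int)) (E ++ [(A, B)]) := by
  have hbigN : big < N := by
    rcases hAB with ⟨h1, _⟩ | ⟨_, h2⟩
    · exact h1 ▸ lt_of_le_of_lt (rootF_le par A) hA
    · exact h2 ▸ lt_of_le_of_lt (rootF_le par B) hB
  have hfixbig : par.getD big 0 = (big : Int) := by
    rcases hAB with ⟨h1, _⟩ | ⟨_, h2⟩
    · exact h1 ▸ rootF_fix h A
    · exact h2 ▸ rootF_fix h B
  have hfixsmall : par.getD small 0 = (small : Int) := by
    rcases hAB with ⟨_, h2⟩ | ⟨h1, _⟩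
    · exact h2 ▸ rootF_fix h B
    · exact h1 ▸ rootF_fix h A
  have huw := union_write h hbigN hfixsmall hfixbig hsb
  refine ⟨huw.1, ?_⟩
  intro j k hj hk
  rw [huw.2 j, huw.2 k, conn_append_iff,
    ← hrc j k hj hk, ← hrc j A hj hA, ← hrc B k hB hk, ← hrc j B hj hB, ← hrc A k hA hk]
  rcases hAB with ⟨h1, h2⟩ | ⟨h1, h2⟩ <;> rw [h1, h2] <;> split_ifs <;> omega

theorem union_edge_eq_rc {N : Nat} {par : List Int} {E : List (Nat × Nat)}
    (hrc : RootConn N par E) {A B : Nat} (hA : A < N) (hB : B < N)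
    (heq : rootF par A = rootF par B) :
    RootConn N par (E ++ [(A, B)]) := by
  intro j k hj hk
  rw [conn_append_iff, ← hrc j k hj hk, ← hrc j A hj hA, ← hrc B k hB hk,
    ← hrc j B hj hB, ← hrc A k hA hk]
  omega

theorem uf_fold {N : Nat} (hN : 0 < N) (lr : List (Int × Int))
    (hlr : ∀ p ∈ lr, (-(N : Int) ≤ p.1 - 1 ∧ p.1 - 1 < N) ∧ (-(N : Int) ≤ p.2 ∧ p.2 < N))
    {par : List Int} {E : List (Nat × Nat)} (h : PInv N par) (hrc : RootConn N par E) :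
    PInv N (lr.foldl (fun par p => ufUnion par p.1 p.2) par) ∧
    RootConn N (lr.foldl (fun par p => ufUnion par p.1 p.2) par) (E ++ edgesOf N lr) := by
  induction lr generalizing par E with
  | nil => simpa [edgesOf] using ⟨h, hrc⟩
  | cons p ps ih =>
    obtain ⟨⟨hl1, hl2⟩, hr12⟩ := hlr p (by simp)
    obtain ⟨hr1, hr2⟩ := hr12
    have hAN : nuI N (p.1 - 1) < N := nuI_lt hl1 hl2
    have hBN : nuI N p.2 < N := nuI_lt hr1 hr2
    have hf1 := ufFind_spec h hl1 hl2
    have hf2 := ufFind_spec hf1.2.1 hr1 hr2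
    have hroot2A : rootF (ufFind (ufFind par (p.1 - 1)).1 p.2).1 (nuI N (p.1 - 1))
        = rootF par (nuI N (p.1 - 1)) := by rw [hf2.2.2, hf1.2.2]
    have hroot2B : rootF (ufFind (ufFind par (p.1 - 1)).1 p.2).1 (nuI N p.2)
        = rootF (ufFind par (p.1 - 1)).1 (nuI N p.2) := by rw [hf2.2.2]
    have hrc2 : RootConn N (ufFind (ufFind par (p.1 - 1)).1 p.2).1 E := by
      intro j k hj hk
      rw [hf2.2.2 j, hf2.2.2 k, hf1.2.2 j, hf1.2.2 k]
      exact hrc j k hj hk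
    set aN := rootF par (nuI N (p.1 - 1)) with haN
    set bN := rootF (ufFind par (p.1 - 1)).1 (nuI N p.2) with hbN
    have haltN : aN < N := lt_of_le_of_lt (rootF_le _ _) hAN
    have hbltN : bN < N := lt_of_le_of_lt (rootF_le _ _) hBN
    have hlen2 : (ufFind (ufFind par (p.1 - 1)).1 p.2).1.length = N := hf2.2.1.len
    have hstep : ∃ par', ufUnion par p.1 p.2 = par' ∧ PInv N par' ∧
        RootConn N par' (E ++ [(nuI N (p.1 - 1), nuI N p.2)]) := by
      rcases Nat.lt_trichotomy aN bN with hab | hab | hab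
      · refine ⟨(ufFind (ufFind par (p.1 - 1)).1 p.2).1.set bN (aN : Int), ?_, ?_⟩
        · simp only [ufUnion]
          rw [hf1.1, hf2.1, if_pos (by exact_mod_cast hab)]
          rw [pySetD_nu (by rw [hlen2]; omega) (by rw [hlen2]; exact_mod_cast hbltN),
            hlen2, nuI_natCast hbltN]
        · exact union_edge_rc hf2.2.1 hrc2 hAN hBN hab
            (Or.inr ⟨by rw [hroot2A], by rw [hroot2B]⟩)
      · refine ⟨(ufFind (ufFind par (p.1 - 1)).1 p.2).1, ?_, hf2.2.1, ?_⟩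
        · simp only [ufUnion]
          rw [hf1.1, hf2.1, if_neg (by simp [hab]), if_neg (by simp [hab])]
        · exact union_edge_eq_rc hrc2 hAN hBN (by rw [hroot2A, hroot2B]; exact hab)
      · refine ⟨(ufFind (ufFind par (p.1 - 1)).1 p.2).1.set aN (bN : Int), ?_, ?_⟩
        · simp only [ufUnion]
          rw [hf1.1, hf2.1, if_neg (by exact_mod_cast Nat.not_lt.mpr (Nat.le_of_lt hab)),
            if_pos (by exact_mod_cast hab)]
          rw [pySetD_nu (by rw [hlen2]; omega) (by rw [hlen2]; exact_mod_cast haltN),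
            hlen2, nuI_natCast haltN]
        · exact union_edge_rc hf2.2.1 hrc2 hAN hBN hab
            (Or.inl ⟨by rw [hroot2A], by rw [hroot2B]⟩)
    obtain ⟨par', hpe, hpi, hprc⟩ := hstep
    have hihres := ih (fun x hx => hlr x (by simp [hx])) hpi hprc
    rw [List.foldl_cons, hpe]
    have hE : E ++ [(nuI N (p.1 - 1), nuI N p.2)] ++ edgesOf N ps = E ++ edgesOf N (p :: ps) := by
      simp [edgesOf, List.append_assoc]
    rw [← hE]
    exact hihres

-- ===== VERDICT (by name: the statement is the Claim_ definition above) =====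
theorem solve_spec : Claim_equal_solve := by
  intro n q lr _ hpre
  obtain ⟨hn, hlr⟩ := hpre
  set N := (n + 1).toNat with hN
  have hN0 : 0 < N := by omega
  have hNc : (N : Int) = n + 1 := by omega
  have hlr' : ∀ p ∈ lr, (-(N : Int) ≤ p.1 - 1 ∧ p.1 - 1 < N) ∧ (-(N : Int) ≤ p.2 ∧ p.2 < N) := by
    intro p hp
    obtain ⟨⟨a1, a2⟩, b1, b2⟩ := hlr p hp
    omega
  have hE := edges_bound hlr'
  have hnu0 : nuI N 0 = 0 := by
    have := nuI_natCast (N := N) (k := 0) hN0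
    simpa using this
  have hnuN : nuI N n = n.toNat := nuI_ofNat hn (by omega)
  have htN : n.toNat < N := by omega
  -- ===== A side =====
  have hg0all : ∀ j, ((PySem.List.pyRange 0 (n + 1) 1).map (fun _ => ([] : List Int))).getD j [] = [] := by
    intro j
    rcases Nat.lt_or_ge j ((PySem.List.pyRange 0 (n + 1) 1).map (fun _ => ([] : List Int))).length with hj | hj
    · rw [List.getD_eq_getElem _ _ hj]
      simp
    · exact getD_eq_default_of_le hj
  have hg0len : ((PySem.List.pyRange 0 (n + 1) 1).map (fun _ => ([] : List Int))).length = N := by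
    rw [List.length_map, PySem.List.length_pyRange_one]
    omega
  have hg0 : GraphOK N [] ((PySem.List.pyRange 0 (n + 1) 1).map (fun _ => ([] : List Int))) := by
    refine ⟨hg0len, ?_, by simp⟩
    intro j v hv
    rw [hg0all j] at hv
    simp at hv
  have hgF := build_ok lr hlr' hg0
  rw [List.nil_append] at hgF
  -- initial visited list
  have hrlen : (List.replicate (n + 1).toNat (0 : Int)).length = N := by
    rw [List.length_replicate]
  have hv0 : PySem.List.pySetD (List.replicate (n + 1).toNat (0 : Int)) 0 1
      = (List.replicate N (0 : Int)).set 0 1 := by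
    rw [pySetD_nu (by rw [hrlen]; omega) (by rw [hrlen]; exact_mod_cast hN0)]
    rw [hrlen, hnu0, hN]
  have h0len : 0 < (List.replicate N (0 : Int)).length := by
    rw [List.length_replicate]; exact hN0
  have hvk0 : ∀ k, k ≠ 0 → ((List.replicate N (0 : Int)).set 0 1).getD k 0 = 0 := by
    intro k hk
    rw [getD_set_ne hk]
    rcases Nat.lt_or_ge k N with hkN | hkN
    · rw [List.getD_eq_getElem _ _ (by rw [List.length_replicate]; exact hkN)]
      simp
    · exact getD_eq_default_of_le (by rw [List.length_replicate]; exact hkN)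
  have hv00 : ((List.replicate N (0 : Int)).set 0 1).getD 0 0 = 1 := getD_set_self h0len
  have hInv0 : BfsInv N (edgesOf N lr) ((List.replicate N (0 : Int)).set 0 1) [0] := by
    refine ⟨by rw [List.length_set, List.length_replicate], ?_, hv00, ?_, ?_, ?_, ?_⟩
    · intro k
      by_cases hk : k = 0
      · subst hk; rw [hv00]; exact Or.inr rfl
      · rw [hvk0 k hk]; exact Or.inl rfl
    · intro x hx
      simp at hx
      subst hx
      exact ⟨by omega, by exact_mod_cast hN0⟩
    · intro x hx
      simp at hx
      subst hx
      rw [hnu0]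
      exact hv00
    · intro k hk
      by_cases hk0 : k = 0
      · subst hk0; exact Relation.ReflTransGen.refl
      · rw [hvk0 k hk0] at hk; exact absurd hk (by norm_num)
    · intro k hk
      by_cases hk0 : k = 0
      · subst hk0
        exact Or.inl ⟨0, by simp, hnu0⟩
      · rw [hvk0 k hk0] at hk; exact absurd hk (by norm_num)
  have hbfs := bfs_main hE _ _ _ hgF hInv0
  have hAresLen := hbfs.1
  have hAchar := hbfs.2 n.toNat
  have hAiff : (PySem.List.pyGet? (bfsLoop
      (lr.foldl (fun g p =>
        let g1 := PySem.List.pySetD g (p.1 - 1) (PySem.List.pyGetD g (p.1 - 1) [] ++ [p.2])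
        PySem.List.pySetD g1 p.2 (PySem.List.pyGetD g1 p.2 [] ++ [p.1 - 1]))
        ((PySem.List.pyRange 0 (n + 1) 1).map (fun _ => ([] : List Int))))
      ((List.replicate N (0 : Int)).set 0 1) [0]) n = some 1)
      ↔ Conn (edgesOf N lr) 0 n.toNat := by
    set res := bfsLoop
      (lr.foldl (fun g p =>
        let g1 := PySem.List.pySetD g (p.1 - 1) (PySem.List.pyGetD g (p.1 - 1) [] ++ [p.2])
        PySem.List.pySetD g1 p.2 (PySem.List.pyGetD g1 p.2 [] ++ [p.1 - 1]))
        ((PySem.List.pyRange 0 (n + 1) 1).map (fun _ => ([] : List Int))))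
      ((List.replicate N (0 : Int)).set 0 1) [0] with hres
    have hntLen : n.toNat < res.length := by rw [hAresLen]; exact htN
    have hget : PySem.List.pyGet? res n = some (res.getD n.toNat 0) := by
      rw [pyGet?_nu (by rw [hAresLen]; omega) (by rw [hAresLen]; omega), hAresLen, hnuN,
        List.getD_eq_getElem _ _ hntLen, List.getElem?_eq_getElem hntLen]
    rw [hget]
    constructor
    · intro hs
      have : res.getD n.toNat 0 = 1 := by exact_mod_cast Option.some_inj.mp hs
      exact (hAchar.mp this).1
    · intro hc
      rw [hAchar.mpr ⟨hc, htN⟩]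
  -- ===== B side =====
  have hp0len : (PySem.List.pyRange 0 (n + 1) 1).length = N := by
    rw [PySem.List.length_pyRange_one]; omega
  have hp0get : ∀ k, k < N → (PySem.List.pyRange 0 (n + 1) 1).getD k 0 = (k : Int) := by
    intro k hk
    rw [List.getD_eq_getElem _ _ (by rw [hp0len]; exact hk)]
    rw [PySem.List.getElem_pyRange_one]
    omega
  have hPInv0 : PInv N (PySem.List.pyRange 0 (n + 1) 1) := by
    refine ⟨hp0len, ?_, ?_⟩
    · intro k
      rcases Nat.lt_or_ge k N with hk | hk
      · rw [hp0get k hk]; positivity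
      · rw [getD_eq_default_of_le (by rw [hp0len]; exact hk)]
    · intro k
      rcases Nat.lt_or_ge k N with hk | hk
      · rw [hp0get k hk]
      · rw [getD_eq_default_of_le (by rw [hp0len]; exact hk)]; positivity
  have hRC0 : RootConn N (PySem.List.pyRange 0 (n + 1) 1) [] := by
    intro j k hj hk
    rw [rootF_of_fix (hp0get j hj), rootF_of_fix (hp0get k hk), conn_empty]
  have huf := uf_fold hN0 lr hlr' hPInv0 hRC0
  rw [List.nil_append] at huf
  set parF := lr.foldl (fun par p => ufUnion par p.1 p.2) (PySem.List.pyRange 0 (n + 1) 1) with hparF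
  have hf1 := ufFind_spec huf.1 (x := 0) (by omega) (by exact_mod_cast hN0)
  have hf2 := ufFind_spec hf1.2.1 (x := n) (by omega) (by omega)
  have hBiff : ((ufFind parF 0).2 = (ufFind (ufFind parF 0).1 n).2)
      ↔ Conn (edgesOf N lr) 0 n.toNat := by
    rw [hf1.1, hf2.1, hnu0, hnuN, hf1.2.2]
    rw [Int.natCast_inj]
    exact huf.2 0 n.toNat hN0 htN
  -- ===== combine =====
  show solve n q lr = solve_alt n q lr
  have hAdef : solve n q lr = (if PySem.List.pyGet? (bfsLoop
      (lr.foldl (fun g p =>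
        let g1 := PySem.List.pySetD g (p.1 - 1) (PySem.List.pyGetD g (p.1 - 1) [] ++ [p.2])
        PySem.List.pySetD g1 p.2 (PySem.List.pyGetD g1 p.2 [] ++ [p.1 - 1]))
        ((PySem.List.pyRange 0 (n + 1) 1).map (fun _ => ([] : List Int))))
      (PySem.List.pySetD (List.replicate (n + 1).toNat (0 : Int)) 0 1) [0]) n = some 1
      then "Yes" else "No") := rfl
  have hBdef : solve_alt n q lr = (if (ufFind parF 0).2 = (ufFind (ufFind parF 0).1 n).2
      then "Yes" else "No") := rfl
  rw [hAdef, hBdef, hv0]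
  by_cases hc : Conn (edgesOf N lr) 0 n.toNat
  · rw [if_pos (hAiff.mpr hc), if_pos (hBiff.mpr hc)]
  · rw [if_neg (fun hx => hc (hAiff.mp hx)), if_neg (fun hx => hc (hBiff.mp hx))]
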